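-- pv_equiv track=rewrite | github.com/MHovenkamp/ATP | compiler_base.py | addWords
-- ===== SOURCE A (Python) =====
-- from typing import List, TypeVar, Union, Tuple
-- import copy
--
-- def addWords(word_List : List[str], asm_string : str = "") -> str:
--     """addWords creates the data segment with al strings saves as .asciz
--
--     Args:
--         word_List (List[str]): list of al strings to be saved
--         asm_string (str, optional): string containing data segment. Defaults to "".
--
--     Returns:
--         str: data segments
--     """
--     if len(word_List) == 0:
--         return asm_string
--
--     word_List_copy = copy.copy(word_List)
--     asm_string_copy = copy.copy(asm_string)
--
--     if asm_string == "":
--         asm_string_copy += "\n\n.data"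
--
--
--     head, *tail = word_List_copy
--     if " " in head:
--         asm_string_copy += "\n" + head.replace(" ", "_") + ":"
--         asm_string_copy += "\t.asciz \"" + head + "\""
--     else:
--         asm_string_copy += "\n" + head + ":"
--         asm_string_copy += "\t.asciz \"" + head + "\""
--
--     return addWords( tail, asm_string_copy)
-- ===== SOURCE B (Python) =====
-- def addWords(word_List, asm_string=""):
--     """Iterative rewrite: build the fragments in one pass and join them."""
--     if not word_List:
--         return asm_string
--     parts = [asm_string]
--     if asm_string == "":
--         parts.append("\n\n.data")
--     for word in word_List:
--         parts.append("\n" + word.replace(" ", "_") + ":\t.asciz \"" + word + "\"")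
--     return "".join(parts)
-- ===== Notes on version B (the rewrite author's own statement) =====
-- stated objective: simpler
-- what changed: Replaced the copy-and-recurse accumulator (which re-tests the header condition and branches on ' ' in head at every call) with a single iterative pass that appends one fragment per word, adds the '.data' header once, and joins at the end; str.replace subsumes the two branches.
import Mathlib
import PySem

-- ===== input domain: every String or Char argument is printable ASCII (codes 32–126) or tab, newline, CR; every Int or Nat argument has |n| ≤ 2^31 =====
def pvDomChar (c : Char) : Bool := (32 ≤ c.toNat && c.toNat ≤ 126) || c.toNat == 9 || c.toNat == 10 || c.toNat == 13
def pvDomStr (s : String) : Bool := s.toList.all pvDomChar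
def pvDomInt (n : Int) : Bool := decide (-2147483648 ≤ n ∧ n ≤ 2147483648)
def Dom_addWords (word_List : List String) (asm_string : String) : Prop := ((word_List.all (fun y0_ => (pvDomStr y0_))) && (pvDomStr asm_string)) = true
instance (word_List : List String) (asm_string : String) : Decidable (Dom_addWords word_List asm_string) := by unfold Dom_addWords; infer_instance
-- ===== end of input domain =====

-- B replaces A's copy-and-recurse accumulator by a single iterative pass joined at the end (objective: simpler).
-- ===== PORT A =====
-- A's recursion, on char lists (strings are handled on the .toList side; String.ofList at the wrapper).
def addWordsGoA : List String → List Char → List Char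
  | [], asm => asm
  | head :: tail, asm =>
      -- if asm_string == "": asm_string_copy += "\n\n.data"
      let asm1 := if asm = [] then asm ++ "\n\n.data".toList else asm
      -- branch on ' ' in head, then the two += lines of the taken branch
      let asm2 :=
        if PySem.Chars.isIn [' '] head.toList then
          (asm1 ++ ('\n' :: PySem.Chars.replace head.toList [' '] ['_'] ++ [':']))
            ++ ("\t.asciz \"".toList ++ head.toList ++ ['"'])
        else
          (asm1 ++ ('\n' :: head.toList ++ [':']))
            ++ ("\t.asciz \"".toList ++ head.toList ++ ['"'])
      addWordsGoA tail asm2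

def addWords (word_List : List String) (asm_string : String) : String :=
  String.ofList (addWordsGoA word_List asm_string.toList)

-- ===== PORT B =====
-- one fragment per word: "\n" + word.replace(" ", "_") + ":\t.asciz \"" + word + "\""
def pvFragB (w : String) : List Char :=
  '\n' :: PySem.Chars.replace w.toList [' '] ['_'] ++ (":\t.asciz \"".toList ++ (w.toList ++ ['"']))

def addWords_alt (word_List : List String) (asm_string : String) : String :=
  if word_List = [] then asm_string
  else
    let parts0 : List (List Char) :=
      if asm_string = "" then [asm_string.toList, "\n\n.data".toList] else [asm_string.toList]
    let parts := word_List.foldl (fun ps w => ps ++ [pvFragB w]) parts0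
    String.ofList parts.flatten   -- "".join(parts)

-- ===== PRECONDITION & SPEC =====
def Spec_addWords (word_List : List String) (asm_string : String) (out : String) : Prop := out = addWords_alt word_List asm_string
instance (word_List : List String) (asm_string : String) (out : String) : Decidable (Spec_addWords word_List asm_string out) := by unfold Spec_addWords; infer_instance

-- ===== CLAIM (what is proved, stated in full; the proofs are below) =====
def Claim_equal_addWords : Prop := ∀ (word_List : List String) (asm_string : String), Dom_addWords word_List asm_string → Spec_addWords word_List asm_string (addWords word_List asm_string)

-- ===== LEMMAS AND PROOFS =====
lemma replace_go_nospace (fuel : Nat) : ∀ (l acc : List Char), ' ' ∉ l →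
    PySem.Chars.replace.go [' '] ['_'] fuel l acc = acc.reverse ++ l := by
  induction fuel with
  | zero => intro l acc _; rfl
  | succ n ih =>
    intro l acc h
    cases l with
    | nil => simp [PySem.Chars.replace.go]
    | cons c t =>
      have hc : c ≠ ' ' := fun hh => h (hh ▸ List.mem_cons_self)
      have hp : [' '].isPrefixOf (c :: t) = false := by
        simp [List.isPrefixOf, hc.symm]
      simp only [PySem.Chars.replace.go, hp, Bool.false_eq_true, ite_false]
      rw [ih t (c :: acc) (fun ht => h (List.mem_cons_of_mem _ ht))]
      simp

lemma replace_nospace (w : List Char) (h : PySem.Chars.isIn [' '] w = false) :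
    PySem.Chars.replace w [' '] ['_'] = w := by
  have hm : ' ' ∉ w := by
    rw [PySem.Chars.isIn_eq_false_iff] at h
    intro hmem
    exact h ((List.singleton_infix_iff ' ' w).mpr hmem)
  simp [PySem.Chars.replace, replace_go_nospace w.length w [] hm]

-- A's tail recursion from a NONEMPTY accumulator just appends the fragments.
lemma goA_nonempty : ∀ (wl : List String) (asm : List Char), asm ≠ [] →
    addWordsGoA wl asm = asm ++ (wl.map pvFragB).flatten := by
  intro wl
  induction wl with
  | nil => intro asm _; simp [addWordsGoA]
  | cons head tail ih =>
    intro asm hasm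
    show addWordsGoA (head :: tail) asm = _
    unfold addWordsGoA
    simp only [if_neg hasm]
    by_cases hsp : PySem.Chars.isIn [' '] head.toList = true
    · simp only [hsp, ite_true]
      rw [ih _ (by simp)]
      simp [pvFragB, List.append_assoc]
    · simp only [Bool.not_eq_true] at hsp
      simp only [hsp, Bool.false_eq_true, ite_false]
      rw [ih _ (by simp)]
      simp [pvFragB, replace_nospace _ hsp, List.append_assoc]

lemma foldl_parts (wl : List String) (p0 : List (List Char)) :
    wl.foldl (fun ps w => ps ++ [pvFragB w]) p0 = p0 ++ wl.map pvFragB := by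
  induction wl generalizing p0 with
  | nil => simp
  | cons h t ih => simp [List.foldl_cons, ih, List.append_assoc]

-- ===== VERDICT (by name: the statement is the Claim_ definition above) =====
theorem addWords_spec : Claim_equal_addWords := by
  intro wl s _
  show addWords wl s = addWords_alt wl s
  unfold addWords addWords_alt
  cases wl with
  | nil => simp [addWordsGoA, String.ofList_toList]
  | cons head tail =>
    simp only [if_neg (List.cons_ne_nil head tail), foldl_parts]
    by_cases hs : s = ""
    · have hsl : s.toList = [] := by simp [hs]
      unfold addWordsGoA
      simp only [hsl, ite_true, List.nil_append]
      by_cases hsp : PySem.Chars.isIn [' '] head.toList = true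
      · simp only [hsp, ite_true]
        rw [goA_nonempty _ _ (by simp)]
        simp [hs, pvFragB, List.append_assoc]
      · simp only [Bool.not_eq_true] at hsp
        simp only [hsp, Bool.false_eq_true, ite_false]
        rw [goA_nonempty _ _ (by simp)]
        simp [hs, pvFragB, replace_nospace _ hsp, List.append_assoc]
    · have hsl : s.toList ≠ [] := by
        intro hh; apply hs
        have := congrArg String.ofList hh
        simpa [String.ofList_toList] using this
      rw [goA_nonempty _ _ ?_]
      · simp [if_neg hs]
      · -- first step of the recursion keeps asm = s.toList ≠ []
        exact hsl
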